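-- pv_equiv track=rewrite | github.com/mnicokar/Python-Level-2 | PS15-Farkle/main.py | validChoices
-- ===== SOURCE A (Python) =====
-- import copy
--
-- def validChoices(choices, dice):
--   dice_copy = copy.copy(dice)
--   for choice in choices:
--     if not choice.isdigit():
--       return False
--     elif int(choice) not in dice_copy:
--       return False
--     elif int(choice) != 1 and int(choice) != 5:
--       return False
--     dice_copy.remove(int(choice))
--   for choice in choices:
--     dice.remove(int(choice))
--   return True
-- ===== SOURCE B (Python) =====
-- def validChoices(choices, dice):
--   # One tabulating pass: validate each choice and count how many 1s / 5s are
--   # requested; then compare the tallies against dice.count.  Only on success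
--   # run the same in-place removal loop A runs on success.
--   need1 = 0
--   need5 = 0
--   for choice in choices:
--     if not choice.isdigit():
--       return False
--     v = int(choice)
--     if v == 1:
--       need1 += 1
--     elif v == 5:
--       need5 += 1
--     else:
--       return False
--   if need1 > dice.count(1) or need5 > dice.count(5):
--     return False
--   for choice in choices:
--     dice.remove(int(choice))
--   return True
-- ===== Notes on version B (the rewrite author's own statement) =====
-- stated objective: alternative
-- what changed: Replaces A's scan-and-remove on a mutable copy of dice (a membership test plus a linear remove per choice) with a single tabulating pass that counts the requested 1s and 5s and one final comparison against dice.count(1)/dice.count(5); the in-place removal from dice on success is kept verbatim.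
import Mathlib
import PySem

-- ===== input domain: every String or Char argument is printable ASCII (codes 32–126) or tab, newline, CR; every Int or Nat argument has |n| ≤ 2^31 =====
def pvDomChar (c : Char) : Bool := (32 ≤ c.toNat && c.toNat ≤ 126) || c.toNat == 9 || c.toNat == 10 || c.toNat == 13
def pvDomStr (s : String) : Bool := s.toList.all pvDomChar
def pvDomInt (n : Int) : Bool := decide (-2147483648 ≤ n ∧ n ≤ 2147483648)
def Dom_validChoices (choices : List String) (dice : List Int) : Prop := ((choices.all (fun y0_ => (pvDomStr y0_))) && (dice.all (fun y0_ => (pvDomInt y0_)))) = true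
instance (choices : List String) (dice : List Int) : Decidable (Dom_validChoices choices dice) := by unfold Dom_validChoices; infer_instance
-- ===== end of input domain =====

-- B replaces A's scan-and-remove on a copy of dice with one tabulating pass
-- (count requested 1s/5s) plus a final comparison against dice.count; the
-- equivalence proved here is about the RETURN value only (on success both
-- Pythons mutate dice by the same removal loop, which a port does not model).


-- ===== PORT A =====
-- the first loop: validates against dice_copy, removing each accepted die
def validChoicesLoopA : List String → List Int → Bool
  | [], _ => true
  | choice :: rest, diceCopy =>
    if ¬ PySem.Str.strIsdigit choice then false
    else
      match PySem.Int.ofStr? choice with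
      | none => false  -- unreachable: isdigit guarantees int(choice) succeeds
      | some v =>
        if ¬ diceCopy.contains v then false
        else if v ≠ 1 ∧ v ≠ 5 then false
        else
          match PySem.List.remove? diceCopy v with
          | none => false  -- unreachable: membership was just checked
          | some diceCopy' => validChoicesLoopA rest diceCopy'

-- dice_copy = copy.copy(dice); the second loop only mutates the caller's dice
-- (each removal succeeds, the values were found in the copy) and is not part
-- of the return value.
def validChoices (choices : List String) (dice : List Int) : Bool :=
  validChoicesLoopA choices dice

-- ===== PORT B =====
-- the tabulating pass: none = some choice is rejected, else the (need1, need5) tallies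
def validChoicesCountB : List String → Nat → Nat → Option (Nat × Nat)
  | [], need1, need5 => some (need1, need5)
  | choice :: rest, need1, need5 =>
    if ¬ PySem.Str.strIsdigit choice then none
    else
      match PySem.Int.ofStr? choice with
      | none => none  -- unreachable: isdigit guarantees int(choice) succeeds
      | some v =>
        if v = 1 then validChoicesCountB rest (need1 + 1) need5
        else if v = 5 then validChoicesCountB rest need1 (need5 + 1)
        else none

-- the final removal loop of Source B only mutates the caller's dice; return value:
def validChoices_alt (choices : List String) (dice : List Int) : Bool :=
  match validChoicesCountB choices 0 0 with
  | none => false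
  | some (need1, need5) =>
    if need1 > PySem.List.count dice 1 ∨ need5 > PySem.List.count dice 5 then false
    else true

-- ===== PRECONDITION & SPEC =====
def Spec_validChoices (choices : List String) (dice : List Int) (out : Bool) : Prop := out = validChoices_alt choices dice
instance (choices : List String) (dice : List Int) (out : Bool) : Decidable (Spec_validChoices choices dice out) := by unfold Spec_validChoices; infer_instance

-- ===== CLAIM (what is proved, stated in full; the proofs are below) =====
def Claim_equal_validChoices : Prop := ∀ (choices : List String) (dice : List Int), Dom_validChoices choices dice → Spec_validChoices choices dice (validChoices choices dice)

-- ===== LEMMAS AND PROOFS =====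

-- pulling an inner step out of the accumulators
theorem countB_shift (choices : List String) (a1 a5 : Nat) :
    validChoicesCountB choices a1 a5 =
      (validChoicesCountB choices 0 0).map (fun p => (p.1 + a1, p.2 + a5)) := by
  induction choices generalizing a1 a5 with
  | nil => simp [validChoicesCountB]
  | cons c rest ih =>
    by_cases hd : PySem.Chars.strIsdigit c.toList
    · cases hv : PySem.Int.ofStr? c with
      | none => simp [validChoicesCountB, hd, hv]
      | some v =>
        by_cases h1 : v = 1
        · simp only [validChoicesCountB, PySem.Str.strIsdigit_eq, hd, hv, h1]
          rw [ih (a1 + 1) a5, ih 1 0]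
          cases validChoicesCountB rest 0 0 with
          | none => rfl
          | some p => simp; omega
        · by_cases h5 : v = 5
          · simp only [validChoicesCountB, PySem.Str.strIsdigit_eq, hd, hv, h5]
            rw [ih a1 (a5 + 1), ih 0 1]
            cases validChoicesCountB rest 0 0 with
            | none => rfl
            | some p => simp; omega
          · simp [validChoicesCountB, hd, hv, h1, h5]
    · simp [validChoicesCountB, hd]

-- the heart: A's scan-and-remove loop equals B's tally-then-compare, for any copy
theorem loopA_eq_countB (choices : List String) (dc : List Int) :
    validChoicesLoopA choices dc =
      (match validChoicesCountB choices 0 0 with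
       | none => false
       | some (n1, n5) =>
         if n1 > PySem.List.count dc 1 ∨ n5 > PySem.List.count dc 5 then false else true) := by
  induction choices generalizing dc with
  | nil =>
    simp [validChoicesLoopA, validChoicesCountB]
  | cons c rest ih =>
    by_cases hd : PySem.Chars.strIsdigit c.toList
    · cases hv : PySem.Int.ofStr? c with
      | none => simp [validChoicesLoopA, validChoicesCountB, hd, hv]
      | some v =>
        by_cases h1 : v = 1
        · subst h1
          have hR : validChoicesCountB (c :: rest) 0 0
              = (validChoicesCountB rest 0 0).map (fun p => (p.1 + 1, p.2)) := by
            have h0 : validChoicesCountB (c :: rest) 0 0 = validChoicesCountB rest 1 0 := by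
              simp [validChoicesCountB, hd, hv]
            rw [h0, countB_shift rest 1 0]
            simp
          by_cases hmem : (1 : Int) ∈ dc
          · have hL : validChoicesLoopA (c :: rest) dc = validChoicesLoopA rest (dc.erase 1) := by
              simp [validChoicesLoopA, hd, hv, hmem,
                PySem.List.remove?_eq_some_erase dc 1 hmem]
            have e1 : (dc.erase 1).count 1 = dc.count 1 - 1 := List.count_erase_self ..
            have e5 : (dc.erase 1).count 5 = dc.count 5 := List.count_erase_of_ne (by decide) ..
            have hpos : 1 ≤ dc.count 1 := List.one_le_count_iff.mpr hmem
            rw [hL, ih, hR]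
            cases hr : validChoicesCountB rest 0 0 with
            | none => rfl
            | some p =>
              simp only [Option.map_some, PySem.List.count_eq, e1, e5]
              by_cases hcmp : p.1 > dc.count 1 - 1 ∨ p.2 > dc.count 5
              · rw [if_pos hcmp, if_pos (by omega)]
              · rw [if_neg hcmp, if_neg (by omega)]
          · have hz : dc.count (1 : Int) = 0 := List.count_eq_zero.mpr hmem
            have hL : validChoicesLoopA (c :: rest) dc = false := by
              simp [validChoicesLoopA, hd, hv, hmem]
            rw [hL, hR]
            cases hr : validChoicesCountB rest 0 0 with
            | none => rfl
            | some p =>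
              simp only [Option.map_some, PySem.List.count_eq, hz]
              rw [if_pos (Or.inl (by omega))]
        · by_cases h5 : v = 5
          · subst h5
            have hR : validChoicesCountB (c :: rest) 0 0
                = (validChoicesCountB rest 0 0).map (fun p => (p.1, p.2 + 1)) := by
              have h0 : validChoicesCountB (c :: rest) 0 0 = validChoicesCountB rest 0 1 := by
                simp [validChoicesCountB, hd, hv]
              rw [h0, countB_shift rest 0 1]
              simp
            by_cases hmem : (5 : Int) ∈ dc
            · have hL : validChoicesLoopA (c :: rest) dc = validChoicesLoopA rest (dc.erase 5) := by
                simp [validChoicesLoopA, hd, hv, hmem,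
                  PySem.List.remove?_eq_some_erase dc 5 hmem]
              have e5 : (dc.erase 5).count 5 = dc.count 5 - 1 := List.count_erase_self ..
              have e1 : (dc.erase 5).count 1 = dc.count 1 := List.count_erase_of_ne (by decide) ..
              have hpos : 1 ≤ dc.count 5 := List.one_le_count_iff.mpr hmem
              rw [hL, ih, hR]
              cases hr : validChoicesCountB rest 0 0 with
              | none => rfl
              | some p =>
                simp only [Option.map_some, PySem.List.count_eq, e1, e5]
                by_cases hcmp : p.1 > dc.count 1 ∨ p.2 > dc.count 5 - 1
                · rw [if_pos hcmp, if_pos (by omega)]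
                · rw [if_neg hcmp, if_neg (by omega)]
            · have hz : dc.count (5 : Int) = 0 := List.count_eq_zero.mpr hmem
              have hL : validChoicesLoopA (c :: rest) dc = false := by
                simp [validChoicesLoopA, hd, hv, hmem]
              rw [hL, hR]
              cases hr : validChoicesCountB rest 0 0 with
              | none => rfl
              | some p =>
                simp only [Option.map_some, PySem.List.count_eq, hz]
                rw [if_pos (Or.inr (by omega))]
          · -- v is neither 1 nor 5: A fails at the membership or at the value
            -- check, B's tally pass rejects
            simp [validChoicesLoopA, validChoicesCountB, hd, hv, h1, h5]
    · simp [validChoicesLoopA, validChoicesCountB, hd]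

-- ===== VERDICT (by name: the statement is the Claim_ definition above) =====
theorem validChoices_spec : Claim_equal_validChoices := by
  intro choices dice _
  unfold Spec_validChoices validChoices validChoices_alt
  rw [loopA_eq_countB]
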